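-- pv_equiv track=rewrite | github.com/wmltogether/Project-Console-Game-Localization | PS3/Chaos-Child/import_chaos.py | makestr_lines
-- ===== SOURCE A (Python) =====
-- def makestr_lines(lines):
--     string_list = []
--     head_list = []
--     num = len(lines)
--     for index, line in enumerate(lines):
--         if u'####' in line:
--             head_list.append(line[5:-7])
--             i = 1
--             string = ''
--             while True:
--                 if index+i >= num:
--                     break
--                 if '####' in lines[index+i]:
--                     break
--                 string += lines[index+i]
--                 i += 1
--             string_list.append(string[:-4])
--     return string_list, head_list
-- ===== SOURCE B (Python) =====
-- def makestr_lines(lines):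
--     string_list = []
--     head_list = []
--     open_hdr = False
--     buf = ''
--     for line in lines:
--         if '####' in line:
--             if open_hdr:
--                 string_list.append(buf[:-4])
--             head_list.append(line[5:-7])
--             open_hdr = True
--             buf = ''
--         elif open_hdr:
--             buf += line
--     if open_hdr:
--         string_list.append(buf[:-4])
--     return string_list, head_list
-- ===== Notes on version B (the rewrite author's own statement) =====
-- stated objective: simpler
-- what changed: Replaces A's nested forward index-scan after each header with a single pass keeping a current-segment buffer and an open-header flag, finalizing the buffer at the next header and at end of input.
import Mathlib
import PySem

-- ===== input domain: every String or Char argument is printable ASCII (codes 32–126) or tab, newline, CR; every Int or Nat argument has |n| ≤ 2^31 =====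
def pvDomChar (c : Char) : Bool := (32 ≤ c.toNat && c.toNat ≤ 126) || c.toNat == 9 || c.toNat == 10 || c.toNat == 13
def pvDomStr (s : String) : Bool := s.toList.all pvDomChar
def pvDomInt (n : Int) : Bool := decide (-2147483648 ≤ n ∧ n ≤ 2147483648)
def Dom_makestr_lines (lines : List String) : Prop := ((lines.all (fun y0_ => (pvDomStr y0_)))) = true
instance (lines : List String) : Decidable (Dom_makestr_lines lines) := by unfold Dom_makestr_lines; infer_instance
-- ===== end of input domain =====

-- B changes the decomposition only (one pass with a buffer instead of a nested forward scan); same result.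

-- shared primitives: `'####' in line`, `line[5:-7]`, `s[:-4]` (strings handled as List Char per PySem)
def pvHdr (line : String) : Bool := PySem.Str.isIn "####" line
def pvHead (line : String) : String := String.ofList (PySem.List.slice line.toList (some 5) (some (-7)))
def pvCut4 (s : List Char) : String := String.ofList (PySem.List.slice s none (some (-4)))

-- ===== PORT A =====
-- inner `while True` of A: walk forward from the line after the header, concatenating until a header or the end
def makestrScanA : List String → List Char → List Char
  | [], s => s
  | l :: rest, s => if pvHdr l then s else makestrScanA rest (s ++ l.toList)

-- outer `for index, line in enumerate(lines)` of A
def makestrGoA : List String → List String → List String → List String × List String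
  | [], strs, heads => (strs, heads)
  | line :: rest, strs, heads =>
    if pvHdr line then
      makestrGoA rest (strs ++ [pvCut4 (makestrScanA rest [])]) (heads ++ [pvHead line])
    else
      makestrGoA rest strs heads

def makestr_lines (lines : List String) : List String × List String :=
  makestrGoA lines [] []

-- ===== PORT B =====
-- single pass with state (open_hdr, buf, string_list, head_list); finalize buf at each new header and at the end
def makestrGoB : List String → Bool → List Char → List String → List String → List String × List String
  | [], opn, buf, strs, heads => (if opn then strs ++ [pvCut4 buf] else strs, heads)
  | line :: rest, opn, buf, strs, heads =>
    if pvHdr line then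
      makestrGoB rest true [] (if opn then strs ++ [pvCut4 buf] else strs) (heads ++ [pvHead line])
    else if opn then
      makestrGoB rest opn (buf ++ line.toList) strs heads
    else
      makestrGoB rest opn buf strs heads

def makestr_lines_alt (lines : List String) : List String × List String :=
  makestrGoB lines false [] [] []

-- ===== PRECONDITION & SPEC =====
def Spec_makestr_lines (lines : List String) (out : List String × List String) : Prop := out = makestr_lines_alt lines
instance (lines : List String) (out : List String × List String) : Decidable (Spec_makestr_lines lines out) := by unfold Spec_makestr_lines; infer_instance

-- ===== CLAIM (what is proved, stated in full; the proofs are below) =====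
def Claim_equal_makestr_lines : Prop := ∀ (lines : List String), Dom_makestr_lines lines → Spec_makestr_lines lines (makestr_lines lines)

-- ===== LEMMAS AND PROOFS =====
theorem makestrScanA_acc (rest : List String) (s : List Char) :
    makestrScanA rest s = s ++ makestrScanA rest [] := by
  induction rest generalizing s with
  | nil => simp [makestrScanA]
  | cons l rest ih =>
    by_cases h : pvHdr l
    · simp [makestrScanA, h]
    · simp only [makestrScanA, h, Bool.false_eq_true, ite_false, List.nil_append]
      rw [ih (s ++ l.toList), ih l.toList]
      simp

theorem makestrGoB_open (rest : List String) (buf : List Char)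
    (strs heads : List String) :
    makestrGoB rest true buf strs heads
      = makestrGoA rest (strs ++ [pvCut4 (buf ++ makestrScanA rest [])]) heads := by
  induction rest generalizing buf strs heads with
  | nil => simp [makestrGoB, makestrGoA, makestrScanA]
  | cons l rest ih =>
    by_cases h : pvHdr l
    · simp only [makestrGoB, makestrGoA, h, if_pos, makestrScanA]
      rw [ih]
      simp
    · simp only [makestrGoB, makestrGoA, h, Bool.false_eq_true, ite_false, ite_true, makestrScanA]
      rw [ih, List.nil_append, makestrScanA_acc rest l.toList]
      simp

theorem makestrGoB_closed (lines : List String) (buf : List Char)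
    (strs heads : List String) :
    makestrGoB lines false buf strs heads = makestrGoA lines strs heads := by
  induction lines generalizing buf strs heads with
  | nil => simp [makestrGoB, makestrGoA]
  | cons l rest ih =>
    by_cases h : pvHdr l
    · simp only [makestrGoB, makestrGoA, h, ite_true, Bool.false_eq_true, ite_false]
      rw [makestrGoB_open]
      simp
    · simp only [makestrGoB, makestrGoA, h, Bool.false_eq_true, ite_false]
      exact ih buf strs heads

-- ===== VERDICT (by name: the statement is the Claim_ definition above) =====
theorem makestr_lines_spec : Claim_equal_makestr_lines := by
  intro lines _
  unfold Spec_makestr_lines makestr_lines makestr_lines_alt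
  rw [makestrGoB_closed]
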